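-- pv_equiv track=rewrite | github.com/hojinida/Algorithm | 프로그래머스/3/64062. 징검다리 건너기/징검다리 건너기.py | solution
-- ===== SOURCE A (Python) =====
-- from collections import deque
--
-- def solution(stones, k):
--     length = len(stones)
--     q = deque()
--     for i in range(k):
--         while q and stones[q[-1]] < stones[i]:
--             q.pop()
--         q.append(i)
--
--     for i in range(k,length):
--         stones[i] = min(stones[i],stones[q[0]])
--
--         if q and q[0] <= i - k:
--             q.popleft()
--
--         while q and stones[q[-1]] < stones[i]:
--             q.pop()
--         q.append(i)
--
--     return max(stones[len(stones)-k:])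
-- ===== SOURCE B (Python) =====
-- def solution(stones, k):
--     return min(max(stones[j:j + k]) for j in range(len(stones) - k + 1))
-- ===== Notes on version B (the rewrite author's own statement) =====
-- stated objective: simpler
-- what changed: Replaces A's in-place mutating monotonic-deque sliding-window pass with a direct one-line computation of the minimum over all k-windows of their maximum (B does not mutate stones; equivalence is about the return value).
import Mathlib
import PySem

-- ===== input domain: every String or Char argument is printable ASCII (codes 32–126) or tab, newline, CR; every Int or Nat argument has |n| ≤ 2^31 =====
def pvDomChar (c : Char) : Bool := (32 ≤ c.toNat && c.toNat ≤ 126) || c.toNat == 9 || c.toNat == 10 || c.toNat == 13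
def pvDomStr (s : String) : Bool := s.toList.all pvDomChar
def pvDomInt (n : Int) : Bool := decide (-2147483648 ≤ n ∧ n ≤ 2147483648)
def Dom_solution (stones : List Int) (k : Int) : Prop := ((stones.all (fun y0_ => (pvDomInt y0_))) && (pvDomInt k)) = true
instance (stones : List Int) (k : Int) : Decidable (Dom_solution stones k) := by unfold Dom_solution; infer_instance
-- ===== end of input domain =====

-- B replaces A's in-place monotonic-deque sliding-window pass by the direct "min over all
-- k-windows of their max" one-liner (simpler, no mutation of `stones`; A mutates its
-- argument, so the equivalence proved here is about the return value only).

-- ===== PORT A =====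
-- `while q and stones[q[-1]] < x: q.pop()`, acting on the REVERSED deque (pop from the
-- front of the reversal = pop from the back of q); exact step-for-step transcription.
def pvPops (st : List Int) (x : Int) : List Int → List Int
  | [] => []
  | j :: rest => if PySem.List.pyGetD st j 0 < x then pvPops st x rest else j :: rest

def solution (stones : List Int) (k : Int) : Int :=
  let length : Int := (stones.length : Int)
  -- for i in range(k): while …: q.pop(); q.append(i)
  let q : List Int := (PySem.List.pyRange 0 k 1).foldl
    (fun q i => (pvPops stones (PySem.List.pyGetD stones i 0) q.reverse).reverse ++ [i]) []
  -- for i in range(k, length): stones[i] = min(stones[i], stones[q[0]]); popleft?; while …: pop; append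
  let res := (PySem.List.pyRange k length 1).foldl
    (fun (p : List Int × List Int) i =>
      let st := PySem.List.pySetD p.1 i
        (min (PySem.List.pyGetD p.1 i 0) (PySem.List.pyGetD p.1 (p.2.headD 0) 0))
      let q1 := if p.2 ≠ [] ∧ p.2.headD 0 ≤ i - k then p.2.tail else p.2
      let q2 := (pvPops st (PySem.List.pyGetD st i 0) q1.reverse).reverse
      (st, q2 ++ [i])) (stones, q)
  -- return max(stones[len(stones)-k:])
  (PySem.List.max? (PySem.List.slice res.1 (some ((res.1.length : Int) - k)) none) (fun y => y)).getD 0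

-- ===== PORT B =====
def solution_alt (stones : List Int) (k : Int) : Int :=
  (PySem.List.min?
    ((PySem.List.pyRange 0 ((stones.length : Int) - k + 1) 1).map
      (fun j => (PySem.List.max? (PySem.List.slice stones (some j) (some (j + k))) (fun y => y)).getD 0))
    (fun y => y)).getD 0

-- ===== PRECONDITION & SPEC =====
-- Exactly the inputs on which the Python A returns: otherwise A raises (IndexError from an
-- empty deque / out-of-range stone, or ValueError from max of the empty final slice).
def Pre_solution (stones : List Int) (k : Int) : Prop := 1 ≤ k ∧ k ≤ (stones.length : Int)
instance (stones : List Int) (k : Int) : Decidable (Pre_solution stones k) := by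
  unfold Pre_solution; infer_instance
def pvWitness_solution : List Int × Int := ([2, 4, 5, 3, 2, 1, 4, 2, 5, 1], 3)

def Spec_solution (stones : List Int) (k : Int) (out : Int) : Prop := out = solution_alt stones k
instance (stones : List Int) (k : Int) (out : Int) : Decidable (Spec_solution stones k out) := by
  unfold Spec_solution; infer_instance

-- ===== CLAIM (what is proved, stated in full; the proofs are below) =====
def Claim_equal_solution : Prop := ∀ (stones : List Int) (k : Int), Dom_solution stones k →
  Pre_solution stones k → Spec_solution stones k (solution stones k)

-- ===== LEMMAS AND PROOFS =====

-- value of the stone list at a Nat index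
def sg (s : List Int) (m : Nat) : Int := s.getD m 0
-- max / min of a list, Python-style over a nonempty list (0 on [])
def mx : List Int → Int
  | [] => 0
  | a :: l => l.foldl max a
def mn : List Int → Int
  | [] => 0
  | a :: l => l.foldl min a
-- Mw j = max of the window s[j:j+K]
def Mw (s : List Int) (K j : Nat) : Int := mx ((s.drop j).take K)
-- Rp c = min of Mw over j = 0..c (prefix minimum of window maxima)
def Rp (s : List Int) (K : Nat) : Nat → Int
  | 0 => Mw s K 0
  | c + 1 => min (Rp s K c) (Mw s K (c + 1))
-- closed form of the value A's mutated array holds at position m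
def Tv (s : List Int) (K m : Nat) : Int :=
  if m < K then sg s m else min (sg s m) (Rp s K (m - K))
-- the deque property: index j dominates every later index seen so far (< i)
def Pq (s : List Int) (K i j : Nat) : Bool :=
  decide (∀ m, j ≤ m → m < i → Tv s K m ≤ Tv s K j)
-- the deque contents before processing index i, as naturals
def Qn (s : List Int) (K i : Nat) : List Nat :=
  (List.range' (i - K) (min i K)).filter (Pq s K i)
def QI (s : List Int) (K i : Nat) : List Int := (Qn s K i).map (fun j : Nat => (j : Int))
-- the mutated stones array before processing index i
def Stt (s : List Int) (K i : Nat) : List Int := (List.range i).map (Tv s K) ++ s.drop i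


-- ---- basic max/min facts ----

theorem mx_mem (l : List Int) (h : l ≠ []) : mx l ∈ l := by
  cases l with
  | nil => exact absurd rfl h
  | cons a t =>
    rcases PySem.List.foldl_max_mem t a with h1 | h1
    · simp [mx, h1]
    · simp [mx]; right; exact h1

theorem le_mx (l : List Int) (x : Int) (hx : x ∈ l) : x ≤ mx l := by
  cases l with
  | nil => simp at hx
  | cons a t =>
    rcases List.mem_cons.mp hx with rfl | h1
    · exact (PySem.List.le_foldl_max t x).1
    · exact (PySem.List.le_foldl_max t a).2 x h1

theorem mx_le (l : List Int) (b : Int) (h : l ≠ []) (hall : ∀ x ∈ l, x ≤ b) : mx l ≤ b :=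
  hall _ (mx_mem l h)

theorem maxD_eq_mx (l : List Int) (h : l ≠ []) :
    (PySem.List.max? l (fun y => y)).getD 0 = mx l := by
  cases l with
  | nil => exact absurd rfl h
  | cons a t => rw [PySem.List.max?_id_cons]; rfl

theorem minD_eq_mn (l : List Int) (h : l ≠ []) :
    (PySem.List.min? l (fun y => y)).getD 0 = mn l := by
  cases l with
  | nil => exact absurd rfl h
  | cons a t => rw [PySem.List.min?_id_cons]; rfl

theorem mn_append_singleton (l : List Int) (x : Int) (h : l ≠ []) :
    mn (l ++ [x]) = min (mn l) x := by
  cases l with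
  | nil => exact absurd rfl h
  | cons a t => simp [mn, List.foldl_append]

-- ---- window maximum facts ----

theorem Mw_ge (s : List Int) (K j m : Nat) (h1 : j ≤ m) (h2 : m < j + K)
    (h3 : m < s.length) : sg s m ≤ Mw s K j := by
  apply le_mx
  have hlen : m - j < ((s.drop j).take K).length := by
    simp [List.length_take, List.length_drop]; omega
  have : ((s.drop j).take K)[m - j]'hlen = s[m]'h3 := by
    rw [List.getElem_take, List.getElem_drop]
    congr 1; omega
  have hmem := List.getElem_mem hlen
  rw [this] at hmem
  have : sg s m = s[m]'h3 := List.getD_eq_getElem s 0 h3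
  rw [this]; exact hmem

theorem Mw_exists (s : List Int) (K j : Nat) (hK : 1 ≤ K) (h : j + K ≤ s.length) :
    ∃ m, j ≤ m ∧ m < j + K ∧ sg s m = Mw s K j := by
  have hne : (s.drop j).take K ≠ [] := by
    intro hc
    have := congrArg List.length hc
    simp [List.length_take, List.length_drop] at this
    omega
  have hmem := mx_mem _ hne
  rcases List.getElem_of_mem hmem with ⟨d, hd, hval⟩
  have hdlen : d < K := by
    have := hd; simp [List.length_take, List.length_drop] at this; omega
  refine ⟨j + d, by omega, by omega, ?_⟩
  have hjd : j + d < s.length := by omega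
  have : ((s.drop j).take K)[d]'hd = s[j + d]'hjd := by
    rw [List.getElem_take, List.getElem_drop]
  rw [sg, List.getD_eq_getElem s 0 hjd, ← this, hval, Mw]

-- ---- prefix-minimum facts ----

theorem Rp_antitone (s : List Int) (K : Nat) {a b : Nat} (h : a ≤ b) :
    Rp s K b ≤ Rp s K a := by
  induction b with
  | zero => have : a = 0 := by omega
            simp [this]
  | succ c ih =>
    rcases Nat.lt_or_ge a (c + 1) with h1 | h1
    · exact le_trans (min_le_left _ _) (ih (by omega))
    · have : a = c + 1 := by omega
      simp [this]

theorem Rp_le_Mw (s : List Int) (K : Nat) {j c : Nat} (h : j ≤ c) :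
    Rp s K c ≤ Mw s K j := by
  induction c with
  | zero => have : j = 0 := by omega
            simp [this, Rp]
  | succ c ih =>
    rcases Nat.lt_or_ge j (c + 1) with h1 | h1
    · exact le_trans (min_le_left _ _) (ih (by omega))
    · have : j = c + 1 := by omega
      subst this; exact min_le_right _ _

theorem Rp_exists (s : List Int) (K c : Nat) : ∃ j, j ≤ c ∧ Rp s K c = Mw s K j := by
  induction c with
  | zero => exact ⟨0, le_refl _, rfl⟩
  | succ c ih =>
    rcases ih with ⟨j, hj, hR⟩
    rcases le_total (Rp s K c) (Mw s K (c + 1)) with h | h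
    · refine ⟨j, by omega, ?_⟩
      rw [show Rp s K (c + 1) = min (Rp s K c) (Mw s K (c + 1)) from rfl, min_eq_left h]
      exact hR
    · refine ⟨c + 1, le_refl _, ?_⟩
      rw [show Rp s K (c + 1) = min (Rp s K c) (Mw s K (c + 1)) from rfl, min_eq_right h]

theorem mn_range_Mw (s : List Int) (K : Nat) : ∀ c,
    mn ((List.range (c + 1)).map (Mw s K)) = Rp s K c := by
  intro c
  induction c with
  | zero => simp [List.range_succ, mn, Rp]
  | succ c ih =>
    rw [List.range_succ, List.map_append]
    simp only [List.map_cons, List.map_nil]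
    rw [mn_append_singleton _ _ (by simp), ih]
    rfl

-- ---- the closed-form array values: window bounds ----

theorem Tv_le_R (s : List Int) (K : Nat) (hK : 1 ≤ K) {i m : Nat} (hi : K ≤ i)
    (hin : i ≤ s.length) (h1 : i - K ≤ m) (h2 : m < i) : Tv s K m ≤ Rp s K (i - K) := by
  rcases Rp_exists s K (i - K) with ⟨j, hj, hR⟩
  rw [hR]
  by_cases hm : m < K
  · rw [Tv, if_pos hm]
    exact Mw_ge s K j m (by omega) (by omega) (by omega)
  · rw [Tv, if_neg hm]
    by_cases hjm : j ≤ m - K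
    · exact le_trans (min_le_right _ _) (Rp_le_Mw s K hjm)
    · exact le_trans (min_le_left _ _) (Mw_ge s K j m (by omega) (by omega) (by omega))

theorem exists_Tv_ge_R (s : List Int) (K : Nat) (hK : 1 ≤ K) {i : Nat} (hi : K ≤ i)
    (hin : i ≤ s.length) : ∃ m, i - K ≤ m ∧ m < i ∧ Rp s K (i - K) ≤ Tv s K m := by
  rcases Mw_exists s K (i - K) hK (by omega) with ⟨m, hm1, hm2, hm3⟩
  refine ⟨m, hm1, by omega, ?_⟩
  have hRM : Rp s K (i - K) ≤ Mw s K (i - K) := Rp_le_Mw s K (le_refl _)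
  by_cases hm : m < K
  · rw [Tv, if_pos hm, hm3]; exact hRM
  · rw [Tv, if_neg hm]
    refine le_min (by rw [hm3]; exact hRM) ?_
    exact Rp_antitone s K (by omega)

theorem mx_Twindow (s : List Int) (K : Nat) (hK : 1 ≤ K) {i : Nat} (hi : K ≤ i)
    (hin : i ≤ s.length) : mx ((List.range' (i - K) K).map (Tv s K)) = Rp s K (i - K) := by
  apply le_antisymm
  · apply mx_le
    · simp; omega
    · intro x hx
      rcases List.mem_map.mp hx with ⟨m, hm, rfl⟩
      rw [List.mem_range'_1] at hm
      exact Tv_le_R s K hK hi hin hm.1 (by omega)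
  · rcases exists_Tv_ge_R s K hK hi hin with ⟨m, hm1, hm2, hm3⟩
    refine le_trans hm3 (le_mx _ _ ?_)
    exact List.mem_map.mpr ⟨m, List.mem_range'_1.mpr ⟨hm1, by omega⟩, rfl⟩

-- ---- deque characterization facts ----

theorem mem_Qn (s : List Int) (K i j : Nat) (h : j ∈ Qn s K i) :
    i - K ≤ j ∧ j < i ∧ Pq s K i j = true := by
  rw [Qn, List.mem_filter, List.mem_range'_1] at h
  refine ⟨h.1.1, ?_, h.2⟩
  have := h.1.2; omega

theorem Pq_le (s : List Int) (K i j m : Nat) (hP : Pq s K i j = true) (h1 : j ≤ m)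
    (h2 : m < i) : Tv s K m ≤ Tv s K j := by
  rw [Pq, decide_eq_true_eq] at hP
  exact hP m h1 h2

theorem Pq_succ (s : List Int) (K i j : Nat) (hj : j ≤ i) :
    Pq s K (i + 1) j = (Pq s K i j && decide (Tv s K i ≤ Tv s K j)) := by
  rw [Pq, Pq, Bool.eq_iff_iff, Bool.and_eq_true, decide_eq_true_eq, decide_eq_true_eq,
    decide_eq_true_eq]
  constructor
  · intro h
    exact ⟨fun m hm1 hm2 => h m hm1 (by omega), h i hj (by omega)⟩
  · rintro ⟨h1, h2⟩ m hm1 hm2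
    rcases Nat.lt_or_ge m i with hmi | hmi
    · exact h1 m hm1 hmi
    · have : m = i := by omega
      subst this; exact h2

theorem Pq_self (s : List Int) (K i : Nat) : Pq s K (i + 1) i = true := by
  rw [Pq, decide_eq_true_eq]
  intro m hm1 hm2
  have : m = i := by omega
  subst this; exact le_refl _

theorem filter_Pq_pairwise (s : List Int) (K i a c : Nat) (h : a + c ≤ i) :
    ((List.range' a c).filter (Pq s K i)).Pairwise (fun x y => Tv s K y ≤ Tv s K x) := by
  have hlt : ((List.range' a c).filter (Pq s K i)).Pairwise (· < ·) :=
    List.Pairwise.sublist List.filter_sublist (List.pairwise_lt_range' ..)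
  refine hlt.imp_of_mem ?_
  intro x y hx hy hxy
  have hxP := (List.mem_filter.mp hx).2
  have hyb := List.mem_range'_1.mp (List.mem_filter.mp hy).1
  exact Pq_le s K i x y hxP (le_of_lt hxy) (by omega)

-- head of the deque: the earliest index dominating its successors carries the window max
theorem Qn_head (s : List Int) (K : Nat) (hK : 1 ≤ K) {i : Nat} (hi : K ≤ i)
    (hin : i ≤ s.length) :
    ∃ j₀ rest, Qn s K i = j₀ :: rest ∧ Tv s K j₀ = Rp s K (i - K) ∧
      i - K ≤ j₀ ∧ j₀ < i := by
  rcases exists_Tv_ge_R s K hK hi hin with ⟨a, ha1, ha2, ha3⟩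
  have haP : Pq s K i a = true := by
    rw [Pq, decide_eq_true_eq]
    intro m hm1 hm2
    exact le_trans (Tv_le_R s K hK hi hin (by omega) hm2) ha3
  have hmem : a ∈ Qn s K i := by
    rw [Qn, List.mem_filter, List.mem_range'_1]
    exact ⟨⟨ha1, by omega⟩, haP⟩
  rcases hq : Qn s K i with _ | ⟨j₀, rest⟩
  · rw [hq] at hmem; simp at hmem
  have hj₀ : j₀ ∈ Qn s K i := by rw [hq]; exact List.mem_cons_self
  rcases mem_Qn s K i j₀ hj₀ with ⟨hjw, hji, hjP⟩
  refine ⟨j₀, rest, rfl, le_antisymm (Tv_le_R s K hK hi hin hjw hji) ?_, hjw, hji⟩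
  have hsort : (Qn s K i).Pairwise (· < ·) :=
    List.Pairwise.sublist List.filter_sublist (List.pairwise_lt_range' ..)
  have hja : j₀ ≤ a := by
    rw [hq] at hmem hsort
    rcases List.mem_cons.mp hmem with rfl | hmem2
    · exact le_refl _
    · exact le_of_lt ((List.pairwise_cons.mp hsort).1 a hmem2)
  exact le_trans ha3 (Pq_le s K i j₀ a hjP hja ha2)

-- ---- the while-pop loop is a filter on a value-sorted deque ----

theorem pvPops_eq_filter (st : List Int) (x : Int) (r : List Int)
    (h : r.Pairwise (fun a b => PySem.List.pyGetD st a 0 ≤ PySem.List.pyGetD st b 0)) :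
    pvPops st x r = r.filter (fun j => decide (x ≤ PySem.List.pyGetD st j 0)) := by
  induction r with
  | nil => rfl
  | cons a t ih =>
    rcases List.pairwise_cons.mp h with ⟨ha, ht⟩
    by_cases hc : PySem.List.pyGetD st a 0 < x
    · rw [pvPops, if_pos hc, ih ht, List.filter_cons]
      simp [not_le.mpr hc]
    · rw [pvPops, if_neg hc, List.filter_cons]
      have hax : x ≤ PySem.List.pyGetD st a 0 := not_lt.mp hc
      simp only [hax, decide_true, if_true]
      congr 1
      refine (List.filter_eq_self.mpr ?_).symm
      intro b hb
      simpa using le_trans hax (ha b hb)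

theorem pop_back (st : List Int) (x : Int) (q : List Int)
    (h : q.Pairwise (fun a b => PySem.List.pyGetD st b 0 ≤ PySem.List.pyGetD st a 0)) :
    (pvPops st x q.reverse).reverse
      = q.filter (fun j => decide (x ≤ PySem.List.pyGetD st j 0)) := by
  have hrev : q.reverse.Pairwise
      (fun a b => PySem.List.pyGetD st a 0 ≤ PySem.List.pyGetD st b 0) := by
    rw [List.pairwise_reverse]; exact h
  rw [pvPops_eq_filter st x q.reverse hrev, ← List.filter_reverse, List.reverse_reverse]

-- ---- the mutated array ----

theorem Stt_length (s : List Int) (K i : Nat) (h : i ≤ s.length) :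
    (Stt s K i).length = s.length := by
  simp [Stt]; omega

theorem Stt_getD (s : List Int) (K i j : Nat) (hj : j < i) :
    (Stt s K i).getD j 0 = Tv s K j := by
  rw [Stt, List.getD_eq_getElem?_getD, List.getElem?_append_left (by simp; omega)]
  simp [hj]

theorem Stt_getD_self (s : List Int) (K i : Nat) (h : i < s.length) :
    (Stt s K i).getD i 0 = sg s i := by
  rw [Stt, List.getD_eq_getElem?_getD, List.getElem?_append_right (by simp)]
  simp [h, sg, List.getD_eq_getElem?_getD]

theorem Stt_getElem (s : List Int) (K i j : Nat) (hi : i ≤ s.length) (hj : j < s.length)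
    (h : j < (Stt s K i).length) :
    (Stt s K i)[j]'h = if j < i then Tv s K j else s[j]'hj := by
  by_cases hji : j < i
  · simp only [Stt]
    rw [List.getElem_append_left (by simpa using hji)]
    simp [hji]
  · simp only [Stt]
    rw [List.getElem_append_right (by simpa using hji)]
    simp only [List.length_map, List.length_range, hji, if_false]
    rw [List.getElem_drop]
    congr 1
    omega

theorem Stt_set (s : List Int) (K i : Nat) (h : i < s.length) :
    (Stt s K i).set i (Tv s K i) = Stt s K (i + 1) := by
  apply List.ext_getElem
  · simp [Stt]; omega
  · intro j h1 h2
    have hj : j < s.length := by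
      have := h1; simp [Stt] at this; omega
    rw [List.getElem_set, Stt_getElem s K i j (by omega) hj,
      Stt_getElem s K (i + 1) j (by omega) hj]
    split_ifs with ha hb hc <;>
      first
        | rfl
        | omega
        | (exfalso; omega)
        | (rw [ha])

theorem Stt_base (s : List Int) (K : Nat) (h : K ≤ s.length) : Stt s K K = s := by
  rw [Stt]
  have : (List.range K).map (Tv s K) = s.take K := by
    apply List.ext_getElem
    · simp; omega
    · intro j h1 h2
      simp only [List.getElem_map, List.getElem_range, List.getElem_take]
      have hj : j < K := by simpa using h1
      rw [Tv, if_pos hj, sg, List.getD_eq_getElem s 0 (by omega)]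
  rw [this, List.take_append_drop]

-- ---- the deque push step, shared by both loops ----

theorem Qn_push (s : List Int) (K i a c : Nat) (hc : a + c = i) (ha : a = i + 1 - K)
    (hK : 1 ≤ K) (hiK : i + 1 ≤ K ∨ K ≤ i) :
    ((List.range' a c).filter (Pq s K i)).filter (fun j => decide (Tv s K i ≤ Tv s K j))
      ++ [i] = Qn s K (i + 1) := by
  rw [List.filter_filter]
  have hcong : ∀ j ∈ List.range' a c,
      (decide (Tv s K i ≤ Tv s K j) && Pq s K i j) = Pq s K (i + 1) j := by
    intro j hj
    rw [List.mem_range'_1] at hj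
    rw [Pq_succ s K i j (by omega), Bool.and_comm]
  rw [List.filter_congr hcong]
  have hsingle : [i] = [i].filter (Pq s K (i + 1)) := by
    simp [Pq_self]
  rw [hsingle, ← List.filter_append]
  have : List.range' a c ++ [i] = List.range' a (c + 1) := by
    rw [List.range'_1_concat]
    congr 2
    omega
  rw [this, Qn]
  congr 2 <;> omega

-- ---- generic map/filter/pairwise helpers for the Int-cast deque ----

theorem filter_map_congr {l : List Nat} {f : Nat → Int} {p : Int → Bool} {q : Nat → Bool}
    (h : ∀ j ∈ l, p (f j) = q j) : (l.map f).filter p = (l.filter q).map f := by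
  induction l with
  | nil => rfl
  | cons a t ih =>
    simp only [List.map_cons, List.filter_cons, h a List.mem_cons_self]
    rw [ih (fun j hj => h j (List.mem_cons_of_mem a hj))]
    by_cases hq : q a = true
    · simp [hq]
    · simp [Bool.eq_false_iff.mpr hq]

theorem pairwise_map_of {l : List Nat} {f : Nat → Int} {R : Int → Int → Prop}
    {S : Nat → Nat → Prop} (h : l.Pairwise S)
    (H : ∀ a ∈ l, ∀ b ∈ l, S a b → R (f a) (f b)) : (l.map f).Pairwise R := by
  induction l with
  | nil => exact List.Pairwise.nil
  | cons a t ih =>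
    rcases List.pairwise_cons.mp h with ⟨ha, ht⟩
    rw [List.map_cons, List.pairwise_cons]
    constructor
    · intro b hb
      rcases List.mem_map.mp hb with ⟨b', hb', rfl⟩
      exact H a List.mem_cons_self b' (List.mem_cons_of_mem a hb') (ha b' hb')
    · exact ih ht (fun x hx y hy hxy =>
        H x (List.mem_cons_of_mem a hx) y (List.mem_cons_of_mem a hy) hxy)

-- ---- the first loop ----

theorem loop1_step (s : List Int) (K : Nat) (hK : 1 ≤ K)
    (i : Nat) (hi : i < K) :
    (pvPops s (PySem.List.pyGetD s (i : Int) 0) (QI s K i).reverse).reverse ++ [(i : Int)]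
      = QI s K (i + 1) := by
  have hval : ∀ j ∈ Qn s K i, PySem.List.pyGetD s ((j : Nat) : Int) 0 = Tv s K j := by
    intro j hj
    rcases mem_Qn s K i j hj with ⟨_, hji, _⟩
    rw [PySem.List.pyGetD_natCast, Tv, if_pos (by omega), sg]
  have hx : PySem.List.pyGetD s (i : Int) 0 = Tv s K i := by
    rw [PySem.List.pyGetD_natCast, Tv, if_pos hi, sg]
  have hbaseQ : (Qn s K i).Pairwise (fun x y => Tv s K y ≤ Tv s K x) := by
    have := filter_Pq_pairwise s K i (i - K) (min i K) (by omega)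
    rw [← Qn] at this
    exact this
  have hpair : (QI s K i).Pairwise
      (fun a b => PySem.List.pyGetD s b 0 ≤ PySem.List.pyGetD s a 0) := by
    rw [QI]
    refine pairwise_map_of hbaseQ ?_
    intro a ha b hb hab
    rw [hval a ha, hval b hb]
    exact hab
  rw [pop_back _ _ _ hpair, QI]
  rw [filter_map_congr (q := fun j => decide (Tv s K i ≤ Tv s K j))
    (fun j hj => by rw [hval j hj, hx])]
  rw [show [(i : Int)] = [i].map (fun j : Nat => (j : Int)) from rfl, ← List.map_append, QI]
  congr 1
  have h0 : Qn s K i = (List.range' (i + 1 - K) i).filter (Pq s K i) := by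
    rw [Qn]
    congr 2 <;> omega
  rw [h0]
  exact Qn_push s K i (i + 1 - K) i (by omega) rfl hK (Or.inl (by omega))

theorem loop1_inv (s : List Int) (K : Nat) (hK : 1 ≤ K) :
    ∀ m, m ≤ K →
      (((List.range m).map (fun t : Nat => (t : Int))).foldl
        (fun q i => (pvPops s (PySem.List.pyGetD s i 0) q.reverse).reverse ++ [i]) [])
        = QI s K m := by
  intro m
  induction m with
  | zero =>
    intro _
    simp [QI, Qn]
  | succ m ih =>
    intro hm
    rw [List.range_succ, List.map_append, List.foldl_append, ih (by omega)]
    simpa using loop1_step s K hK m (by omega)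

-- ---- the second loop ----

theorem loop2_inv (s : List Int) (K : Nat) (hK : 1 ≤ K) (hKn : K ≤ s.length) :
    ∀ m, m ≤ s.length - K →
      (((List.range m).map (fun t : Nat => ((K + t : Nat) : Int))).foldl
        (fun (p : List Int × List Int) i =>
          let st := PySem.List.pySetD p.1 i
            (min (PySem.List.pyGetD p.1 i 0) (PySem.List.pyGetD p.1 (p.2.headD 0) 0))
          let q1 := if p.2 ≠ [] ∧ p.2.headD 0 ≤ i - (K : Int) then p.2.tail else p.2
          let q2 := (pvPops st (PySem.List.pyGetD st i 0) q1.reverse).reverse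
          (st, q2 ++ [i])) (s, QI s K K))
        = (Stt s K (K + m), QI s K (K + m)) := by
  intro m
  induction m with
  | zero =>
    intro _
    simp [Stt_base s K hKn]
  | succ m ih =>
    intro hm
    rw [List.range_succ, List.map_append, List.foldl_append, ih (by omega)]
    dsimp only [List.map_cons, List.map_nil, List.foldl_cons, List.foldl_nil]
    -- one iteration at index i = K + m
    set i : Nat := K + m with hidef
    have hi1 : K ≤ i := by omega
    have hi2 : i < s.length := by omega
    obtain ⟨j₀, rest, hq, hj₀v, hj₀w, hj₀i⟩ := Qn_head s K hK hi1 (by omega)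
    have hQIcons : QI s K i = ((j₀ : Nat) : Int) :: rest.map (fun j : Nat => (j : Int)) := by
      rw [QI, hq, List.map_cons]
    -- the value read at the deque head is the running window maximum
    have hhead : PySem.List.pyGetD (Stt s K i) ((QI s K i).headD 0) 0 = Rp s K (i - K) := by
      rw [hQIcons]
      simp only [List.headD_cons]
      rw [PySem.List.pyGetD_natCast, Stt_getD s K i j₀ hj₀i, hj₀v]
    have hself : PySem.List.pyGetD (Stt s K i) ((i : Nat) : Int) 0 = sg s i := by
      rw [PySem.List.pyGetD_natCast, Stt_getD_self s K i hi2]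
    -- the write produces the next array
    have hst : PySem.List.pySetD (Stt s K i) ((i : Nat) : Int)
        (min (PySem.List.pyGetD (Stt s K i) ((i : Nat) : Int) 0)
          (PySem.List.pyGetD (Stt s K i) ((QI s K i).headD 0) 0)) = Stt s K (i + 1) := by
      rw [hhead, hself, PySem.List.pySetD_natCast]
      rw [show min (sg s i) (Rp s K (i - K)) = Tv s K i from by rw [Tv, if_neg (by omega)]]
      exact Stt_set s K i hi2
    -- the popleft leaves exactly the indices of the shrunk window
    have hr : List.range' (i - K) K = (i - K) :: List.range' (i - K + 1) (K - 1) := by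
      rw [show K = (K - 1) + 1 from by omega, List.range'_succ]
      congr 2 <;> omega
    have hQn : Qn s K i = (List.range' (i - K) K).filter (Pq s K i) := by
      rw [Qn]
      congr 2 <;> omega
    have hq1 : (if QI s K i ≠ [] ∧ (QI s K i).headD 0 ≤ ((i : Nat) : Int) - (K : Int)
          then (QI s K i).tail else QI s K i)
        = ((List.range' (i - K + 1) (K - 1)).filter (Pq s K i)).map
            (fun j : Nat => (j : Int)) := by
      by_cases hP : Pq s K i (i - K) = true
      · have hcons : Qn s K i
            = (i - K) :: (List.range' (i - K + 1) (K - 1)).filter (Pq s K i) := by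
          rw [hQn, hr, List.filter_cons, hP]
          simp
        rw [if_pos ?_]
        · rw [QI, hcons, List.map_cons, List.tail_cons]
        · constructor
          · rw [QI, hcons]; simp
          · rw [QI, hcons, List.map_cons, List.headD_cons]
            push_cast
            omega
      · have hZ : Qn s K i = (List.range' (i - K + 1) (K - 1)).filter (Pq s K i) := by
          rw [hQn, hr, List.filter_cons, Bool.eq_false_iff.mpr hP]
          simp
        rw [if_neg ?_]
        · rw [QI, hZ]
        · rintro ⟨hne, hle⟩
          rw [QI, hZ] at hle
          rw [hq] at hZ
          have hj₀Z : j₀ ∈ (List.range' (i - K + 1) (K - 1)).filter (Pq s K i) := by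
            rw [← hZ]; exact List.mem_cons_self
          have := List.mem_range'_1.mp (List.mem_filter.mp hj₀Z).1
          rw [← hZ, List.map_cons, List.headD_cons] at hle
          have : (i : Int) - (K : Int) = ((i - K : Nat) : Int) := by push_cast; omega
          omega
    -- the pop-and-append advances the deque
    have hvals : ∀ j ∈ (List.range' (i - K + 1) (K - 1)).filter (Pq s K i),
        PySem.List.pyGetD (Stt s K (i + 1)) ((j : Nat) : Int) 0 = Tv s K j := by
      intro j hj
      have := List.mem_range'_1.mp (List.mem_filter.mp hj).1
      rw [PySem.List.pyGetD_natCast, Stt_getD s K (i + 1) j (by omega)]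
    have hxv : PySem.List.pyGetD (Stt s K (i + 1)) ((i : Nat) : Int) 0 = Tv s K i := by
      rw [PySem.List.pyGetD_natCast, Stt_getD s K (i + 1) i (by omega)]
    have hZpair : ((List.range' (i - K + 1) (K - 1)).filter (Pq s K i)).Pairwise
        (fun x y => Tv s K y ≤ Tv s K x) :=
      filter_Pq_pairwise s K i (i - K + 1) (K - 1) (by omega)
    have hpair : (((List.range' (i - K + 1) (K - 1)).filter (Pq s K i)).map
          (fun j : Nat => (j : Int))).Pairwise
        (fun a b => PySem.List.pyGetD (Stt s K (i + 1)) b 0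
          ≤ PySem.List.pyGetD (Stt s K (i + 1)) a 0) := by
      refine pairwise_map_of hZpair ?_
      intro a ha b hb hab
      rw [hvals a ha, hvals b hb]
      exact hab
    rw [hst, hq1, pop_back _ _ _ hpair]
    rw [filter_map_congr (q := fun j => decide (Tv s K i ≤ Tv s K j))
      (fun j hj => by rw [hvals j hj, hxv])]
    rw [show [((i : Nat) : Int)] = [i].map (fun j : Nat => (j : Int)) from rfl,
      ← List.map_append]
    rw [Qn_push s K i (i - K + 1) (K - 1) (by omega) (by omega) hK (Or.inr hi1)]
    rw [show K + (m + 1) = i + 1 from by omega]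
    exact Prod.ext rfl rfl

-- ---- assembling the two ports ----

theorem pyRange_cast0 (K : Nat) :
    PySem.List.pyRange 0 (K : Int) 1 = (List.range K).map (fun t : Nat => (t : Int)) := by
  rw [PySem.List.pyRange_one]
  simp

theorem pyRange_cast2 (K n : Nat) :
    PySem.List.pyRange (K : Int) (n : Int) 1
      = (List.range (n - K)).map (fun t : Nat => ((K + t : Nat) : Int)) := by
  rw [PySem.List.pyRange_one]
  rw [show ((n : Int) - (K : Int)).toNat = n - K from by omega]
  simp

theorem solution_eq_Rp (stones : List Int) (K : Nat) (hK : 1 ≤ K)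
    (hKn : K ≤ stones.length) :
    solution stones (K : Int) = Rp stones K (stones.length - K) := by
  rw [solution]
  rw [pyRange_cast0 K, loop1_inv stones K hK K (le_refl K)]
  rw [pyRange_cast2 K stones.length,
    loop2_inv stones K hK hKn (stones.length - K) (le_refl _)]
  rw [show K + (stones.length - K) = stones.length from by omega]
  dsimp only
  rw [Stt_length stones K stones.length (le_refl _)]
  rw [show (stones.length : Int) - (K : Int) = ((stones.length - K : Nat) : Int) from by
    push_cast; omega]
  rw [PySem.List.slice_from_natCast]
  rw [show Stt stones K stones.length
      = (List.range' 0 (stones.length - K)).map (Tv stones K)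
        ++ (List.range' (stones.length - K) K).map (Tv stones K) from by
    rw [Stt, List.drop_length, List.append_nil, ← List.map_append]
    congr 1
    have h1 : List.range' 0 (stones.length - K) ++ List.range' (0 + (stones.length - K)) K
        = List.range' 0 ((stones.length - K) + K) := List.range'_append_1
    rw [Nat.zero_add] at h1
    rw [show stones.length - K + K = stones.length from by omega] at h1
    exact List.range_eq_range'.trans h1.symm]
  have hdrop : ∀ (l1 l2 : List Int), l1.length = stones.length - K →
      (l1 ++ l2).drop (stones.length - K) = l2 := by
    intro l1 l2 h
    rw [← h, List.drop_left]
  rw [hdrop _ _ (by simp)]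
  rw [maxD_eq_mx _ (by simp; omega)]
  exact mx_Twindow stones K hK (by omega) (le_refl _)

theorem solution_alt_eq_Rp (stones : List Int) (K : Nat) (hK : 1 ≤ K)
    (hKn : K ≤ stones.length) :
    solution_alt stones (K : Int) = Rp stones K (stones.length - K) := by
  rw [solution_alt]
  rw [show (stones.length : Int) - (K : Int) + 1 = ((stones.length - K + 1 : Nat) : Int)
    from by push_cast; omega]
  rw [pyRange_cast0 (stones.length - K + 1), List.map_map]
  have hcong : ∀ j ∈ List.range (stones.length - K + 1),
      ((fun j => (PySem.List.max? (PySem.List.slice stones (some j) (some (j + (K : Int))))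
          (fun y => y)).getD 0) ∘ (fun t : Nat => (t : Int))) j = Mw stones K j := by
    intro j hj
    have hjn : j ≤ stones.length - K := by
      have := List.mem_range.mp hj; omega
    simp only [Function.comp_apply]
    rw [show (j : Int) + (K : Int) = ((j + K : Nat) : Int) from by push_cast; ring]
    rw [PySem.List.slice_natCast]
    rw [show j + K - j = K from by omega]
    rw [maxD_eq_mx _ ?_]
    · rfl
    · intro hc
      have := congrArg List.length hc
      simp [List.length_take, List.length_drop] at this
      omega
  rw [List.map_congr_left hcong]
  rw [minD_eq_mn _ (by simp)]
  exact mn_range_Mw stones K (stones.length - K)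

-- ===== VERDICT (by name: the statement is the Claim_ definition above) =====
theorem solution_spec : Claim_equal_solution := by
  unfold Claim_equal_solution
  intro stones k hdom hpre
  unfold Spec_solution
  rcases hpre with ⟨hk1, hkn⟩
  obtain ⟨K, rfl⟩ : ∃ K : Nat, k = (K : Int) :=
    ⟨k.toNat, (Int.toNat_of_nonneg (by omega)).symm⟩
  have hK : 1 ≤ K := by exact_mod_cast hk1
  have hKn : K ≤ stones.length := by exact_mod_cast hkn
  rw [solution_eq_Rp stones K hK hKn, solution_alt_eq_Rp stones K hK hKn]
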